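-- pv_equiv track=rewrite | github.com/Endor-Solutions-Architecture/scripts | generate_findings_report/generate_findings_report.py | derive_category
-- ===== SOURCE A (Python) =====
-- from typing import Dict, List, Any, Optional, Tuple
--
-- _CATEGORY_PRIORITY = [
--     ("FINDING_CATEGORY_CONTAINER", "Container"),
--     ("FINDING_CATEGORY_SAST", "SAST"),
--     ("FINDING_CATEGORY_SECRETS", "Secrets"),
--     ("FINDING_CATEGORY_MALWARE", "Malware"),
--     ("FINDING_CATEGORY_LICENSE_RISK", "License"),
--     ("FINDING_CATEGORY_OPERATIONAL", "Operational"),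
--     ("FINDING_CATEGORY_VULNERABILITY", "Vulnerability"),
-- ]
--
-- def derive_category(finding_categories: Any) -> str:
--     """Map finding_categories list to a single clean label using priority."""
--     if not finding_categories:
--         return "Other"
--     cats = finding_categories if isinstance(finding_categories, list) else [finding_categories]
--     cat_set = set(cats)
--     for raw_cat, label in _CATEGORY_PRIORITY:
--         if raw_cat in cat_set:
--             return label
--     return "Other"
-- ===== SOURCE B (Python) =====
-- _CATEGORY_PRIORITY = [
--     ("FINDING_CATEGORY_CONTAINER", "Container"),
--     ("FINDING_CATEGORY_SAST", "SAST"),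
--     ("FINDING_CATEGORY_SECRETS", "Secrets"),
--     ("FINDING_CATEGORY_MALWARE", "Malware"),
--     ("FINDING_CATEGORY_LICENSE_RISK", "License"),
--     ("FINDING_CATEGORY_OPERATIONAL", "Operational"),
--     ("FINDING_CATEGORY_VULNERABILITY", "Vulnerability"),
-- ]
--
-- _RANK = {raw: i for i, (raw, _label) in enumerate(_CATEGORY_PRIORITY)}
-- _LABELS = [label for _raw, label in _CATEGORY_PRIORITY]
--
--
-- def derive_category(finding_categories):
--     """Map finding_categories list to a single clean label using priority."""
--     if not finding_categories:
--         return "Other"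
--     cats = finding_categories if isinstance(finding_categories, list) else [finding_categories]
--     best = None
--     for c in cats:
--         r = _RANK.get(c)
--         if r is not None and (best is None or r < best):
--             best = r
--     if best is None:
--         return "Other"
--     return _LABELS[best]
-- ===== Notes on version B (the rewrite author's own statement) =====
-- stated objective: alternative
-- what changed: Instead of scanning the fixed priority list and testing membership of each raw category in a set of the input, B does one pass over the input categories keeping the minimum priority rank found via a precomputed rank dict, then returns the label at that rank.
import Mathlib
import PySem

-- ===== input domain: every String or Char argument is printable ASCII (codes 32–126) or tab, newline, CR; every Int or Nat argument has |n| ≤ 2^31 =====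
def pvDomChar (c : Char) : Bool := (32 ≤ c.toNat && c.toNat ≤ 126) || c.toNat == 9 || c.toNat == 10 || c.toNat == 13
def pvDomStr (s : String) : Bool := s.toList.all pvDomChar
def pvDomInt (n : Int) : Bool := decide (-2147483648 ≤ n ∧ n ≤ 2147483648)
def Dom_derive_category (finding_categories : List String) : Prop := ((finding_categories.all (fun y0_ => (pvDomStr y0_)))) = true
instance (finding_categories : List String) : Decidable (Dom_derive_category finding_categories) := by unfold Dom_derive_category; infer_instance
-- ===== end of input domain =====

-- B replaces A's ordered scan of the fixed priority list (with a set of the input) by a single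
-- pass over the input categories that keeps the minimum priority rank (rank dict + label table);
-- objective: alternative decomposition, same cost.

-- ===== PORT A =====
def pvPrio : List (String × String) :=
  [("FINDING_CATEGORY_CONTAINER", "Container"),
   ("FINDING_CATEGORY_SAST", "SAST"),
   ("FINDING_CATEGORY_SECRETS", "Secrets"),
   ("FINDING_CATEGORY_MALWARE", "Malware"),
   ("FINDING_CATEGORY_LICENSE_RISK", "License"),
   ("FINDING_CATEGORY_OPERATIONAL", "Operational"),
   ("FINDING_CATEGORY_VULNERABILITY", "Vulnerability")]

-- the 'for raw_cat, label in _CATEGORY_PRIORITY' loop with its early return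
def pvScanA : List (String × String) → PySem.Set String → String
  | [], _ => "Other"
  | (raw, label) :: rest, s => if PySem.Set.contains s raw then label else pvScanA rest s

def derive_category (finding_categories : List String) : String :=
  if finding_categories.isEmpty then "Other"
  else pvScanA pvPrio (PySem.Set.ofList finding_categories)

-- ===== PORT B =====
-- _RANK = {raw: i for i, (raw, _label) in enumerate(_CATEGORY_PRIORITY)}
def pvRank : PySem.Dict String Int :=
  PySem.Dict.mk [("FINDING_CATEGORY_CONTAINER", 0),
                 ("FINDING_CATEGORY_SAST", 1),
                 ("FINDING_CATEGORY_SECRETS", 2),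
                 ("FINDING_CATEGORY_MALWARE", 3),
                 ("FINDING_CATEGORY_LICENSE_RISK", 4),
                 ("FINDING_CATEGORY_OPERATIONAL", 5),
                 ("FINDING_CATEGORY_VULNERABILITY", 6)]

-- _LABELS = [label for _raw, label in _CATEGORY_PRIORITY]
def pvLabels : List String :=
  ["Container", "SAST", "Secrets", "Malware", "License", "Operational", "Vulnerability"]

-- body of 'for c in cats: r = _RANK.get(c); if r is not None and (best is None or r < best): best = r'
def pvStepB (best : Option Int) (c : String) : Option Int :=
  match PySem.Dict.get? pvRank c with
  | none => best
  | some r =>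
    match best with
    | none => some r
    | some u => if r < u then some r else some u

def derive_category_alt (finding_categories : List String) : String :=
  if finding_categories.isEmpty then "Other"
  else
    match finding_categories.foldl pvStepB none with
    | none => "Other"
    | some k => ((PySem.List.pyGet? pvLabels k).getD "")  -- _LABELS[best]; in range since ranks are 0..6

-- ===== PRECONDITION & SPEC =====
def Spec_derive_category (finding_categories : List String) (out : String) : Prop := out = derive_category_alt finding_categories
instance (finding_categories : List String) (out : String) : Decidable (Spec_derive_category finding_categories out) := by unfold Spec_derive_category; infer_instance

-- ===== CLAIM (what is proved, stated in full; the proofs are below) =====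
def Claim_equal_derive_category : Prop := ∀ (finding_categories : List String), Dom_derive_category finding_categories → Spec_derive_category finding_categories (derive_category finding_categories)

-- ===== LEMMAS AND PROOFS =====

def pvRaw (i : Nat) : String := ((pvPrio.getD i ("", "")).1)

theorem rank_pvRaw {i : Nat} (hi : i < 7) :
    PySem.Dict.get? pvRank (pvRaw i) = some (i : Int) := by
  interval_cases i <;> decide

theorem rank_some_char {c : String} {j : Int}
    (h : PySem.Dict.get? pvRank c = some j) :
    ∃ i : Nat, i < 7 ∧ c = pvRaw i ∧ j = (i : Int) := by
  by_cases h0 : c = pvRaw 0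
  · exact ⟨0, by norm_num, h0, by subst h0; rw [rank_pvRaw (by norm_num)] at h; exact (Option.some.inj h).symm⟩
  · by_cases h1 : c = pvRaw 1
    · exact ⟨1, by norm_num, h1, by subst h1; rw [rank_pvRaw (by norm_num)] at h; exact (Option.some.inj h).symm⟩
    · by_cases h2 : c = pvRaw 2
      · exact ⟨2, by norm_num, h2, by subst h2; rw [rank_pvRaw (by norm_num)] at h; exact (Option.some.inj h).symm⟩
      · by_cases h3 : c = pvRaw 3
        · exact ⟨3, by norm_num, h3, by subst h3; rw [rank_pvRaw (by norm_num)] at h; exact (Option.some.inj h).symm⟩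
        · by_cases h4 : c = pvRaw 4
          · exact ⟨4, by norm_num, h4, by subst h4; rw [rank_pvRaw (by norm_num)] at h; exact (Option.some.inj h).symm⟩
          · by_cases h5 : c = pvRaw 5
            · exact ⟨5, by norm_num, h5, by subst h5; rw [rank_pvRaw (by norm_num)] at h; exact (Option.some.inj h).symm⟩
            · by_cases h6 : c = pvRaw 6
              · exact ⟨6, by norm_num, h6, by subst h6; rw [rank_pvRaw (by norm_num)] at h; exact (Option.some.inj h).symm⟩
              · exfalso
                have g0 : ¬ ("FINDING_CATEGORY_CONTAINER" = c) := fun e => h0 e.symm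
                have g1 : ¬ ("FINDING_CATEGORY_SAST" = c) := fun e => h1 e.symm
                have g2 : ¬ ("FINDING_CATEGORY_SECRETS" = c) := fun e => h2 e.symm
                have g3 : ¬ ("FINDING_CATEGORY_MALWARE" = c) := fun e => h3 e.symm
                have g4 : ¬ ("FINDING_CATEGORY_LICENSE_RISK" = c) := fun e => h4 e.symm
                have g5 : ¬ ("FINDING_CATEGORY_OPERATIONAL" = c) := fun e => h5 e.symm
                have g6 : ¬ ("FINDING_CATEGORY_VULNERABILITY" = c) := fun e => h6 e.symm
                simp [pvRank, PySem.Dict.get?, g0, g1, g2, g3, g4, g5, g6] at h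

-- lower bound is preserved by the fold
theorem fold_lower (fcs : List String) (i : Int) :
    ∀ b : Option Int, (∀ j, b = some j → i ≤ j) →
    (∀ c ∈ fcs, ∀ j, PySem.Dict.get? pvRank c = some j → i ≤ j) →
    ∀ j, fcs.foldl pvStepB b = some j → i ≤ j := by
  induction fcs with
  | nil => intro b hb _ j hj; exact hb j hj
  | cons c fcs ih =>
    intro b hb hmem j hj
    simp only [List.foldl_cons] at hj
    refine ih (pvStepB b c) ?_ (fun c' hc' => hmem c' (List.mem_cons_of_mem _ hc')) j hj
    intro j' hj'
    unfold pvStepB at hj'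
    rcases hr : PySem.Dict.get? pvRank c with _ | r <;> rw [hr] at hj'
    · exact hb j' hj'
    · have hir : i ≤ r := hmem c (List.mem_cons_self) r hr
      rcases b with _ | u
      · simp at hj'; omega
      · have hu := hb u rfl
        by_cases hlt : r < u <;> simp [hlt] at hj' <;> omega

-- once the accumulator is some v, the result is some j with j ≤ v
theorem fold_keeps (fcs : List String) :
    ∀ v : Int, ∃ j, fcs.foldl pvStepB (some v) = some j ∧ j ≤ v := by
  induction fcs with
  | nil => intro v; exact ⟨v, rfl, le_refl v⟩
  | cons c fcs ih =>
    intro v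
    simp only [List.foldl_cons]
    unfold pvStepB
    rcases hr : PySem.Dict.get? pvRank c with _ | r
    · exact ih v
    · by_cases hlt : r < v
      · simp only [hlt, if_true]
        obtain ⟨j, hj, hle⟩ := ih r
        exact ⟨j, hj, by omega⟩
      · simp only [hlt, if_false]
        exact ih v

-- a member with rank i forces the result down to ≤ i
theorem fold_upper (fcs : List String) :
    ∀ (b : Option Int) (c0 : String) (i : Int), c0 ∈ fcs →
    PySem.Dict.get? pvRank c0 = some i →
    ∃ j, fcs.foldl pvStepB b = some j ∧ j ≤ i := by
  induction fcs with
  | nil => intro _ _ _ h; exact absurd h (List.not_mem_nil)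
  | cons c fcs ih =>
    intro b c0 i hmem hr
    simp only [List.foldl_cons]
    rcases List.mem_cons.mp hmem with heq | htail
    · subst heq
      unfold pvStepB
      rw [hr]
      rcases b with _ | u
      · obtain ⟨j, hj, hle⟩ := fold_keeps fcs i; exact ⟨j, hj, hle⟩
      · by_cases hlt : i < u
        · simp only [hlt, if_true]
          obtain ⟨j, hj, hle⟩ := fold_keeps fcs i; exact ⟨j, hj, hle⟩
        · simp only [hlt, if_false]
          obtain ⟨j, hj, hle⟩ := fold_keeps fcs u
          exact ⟨j, hj, by omega⟩
    · exact ih (pvStepB b c) c0 i htail hr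

-- the exact value of the fold when pvRaw i is the highest-priority member
theorem fold_first {fcs : List String} {i : Nat} (hi : i < 7)
    (hmem : pvRaw i ∈ fcs) (habs : ∀ j : Nat, j < i → pvRaw j ∉ fcs) :
    fcs.foldl pvStepB none = some (i : Int) := by
  obtain ⟨j, hj, hle⟩ := fold_upper fcs none (pvRaw i) i hmem (rank_pvRaw hi)
  have hlow : (i : Int) ≤ j := by
    refine fold_lower fcs i none (by intro _ h; cases h) ?_ j hj
    intro c hc k hk
    obtain ⟨i', hi', hc', hk'⟩ := rank_some_char hk
    subst hc' hk'
    by_contra hlt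
    exact habs i' (by omega) (by simpa using hc)
  rw [hj]; congr 1; omega

-- no member has a rank: the fold returns its accumulator
theorem fold_none {fcs : List String}
    (habs : ∀ j : Nat, j < 7 → pvRaw j ∉ fcs) :
    ∀ b, fcs.foldl pvStepB b = b := by
  induction fcs with
  | nil => intro b; rfl
  | cons c fcs ih =>
    intro b
    simp only [List.foldl_cons]
    have hr : PySem.Dict.get? pvRank c = none := by
      rcases h : PySem.Dict.get? pvRank c with _ | r
      · rfl
      · obtain ⟨i', hi', hc', _⟩ := rank_some_char h
        exact absurd (hc' ▸ List.mem_cons_self) (habs i' hi')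
    rw [show pvStepB b c = b by unfold pvStepB; rw [hr]]
    exact ih (fun j hj hm => habs j hj (List.mem_cons_of_mem _ hm)) b

theorem contains_ofList_iff {xs : List String} {x : String} :
    PySem.Set.contains (PySem.Set.ofList xs) x = true ↔ x ∈ xs := by
  rw [PySem.Set.contains_iff, PySem.Set.mem_ofList]

theorem scanA_eq (fcs : List String) :
    pvScanA pvPrio (PySem.Set.ofList fcs) =
      match fcs.foldl pvStepB none with
      | none => "Other"
      | some k => ((PySem.List.pyGet? pvLabels k).getD "") := by
  by_cases h0 : "FINDING_CATEGORY_CONTAINER" ∈ fcs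
  · rw [fold_first (i := 0) (by norm_num) h0 (by omega)]
    simp only [pvScanA, pvPrio]
    rw [if_pos (contains_ofList_iff.mpr h0)]
    decide
  · -- FINDING_CATEGORY_CONTAINER absent
    by_cases h1 : "FINDING_CATEGORY_SAST" ∈ fcs
    · rw [fold_first (i := 1) (by norm_num) h1 (by intro j hj; interval_cases j; exact h0)]
      simp only [pvScanA, pvPrio]
      rw [if_neg (fun hc => h0 (contains_ofList_iff.mp hc)),
          if_pos (contains_ofList_iff.mpr h1)]
      decide
    · -- FINDING_CATEGORY_SAST absent
      by_cases h2 : "FINDING_CATEGORY_SECRETS" ∈ fcs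
      · rw [fold_first (i := 2) (by norm_num) h2 (by intro j hj; interval_cases j <;> first | exact h0 | exact h1)]
        simp only [pvScanA, pvPrio]
        rw [if_neg (fun hc => h0 (contains_ofList_iff.mp hc)),
            if_neg (fun hc => h1 (contains_ofList_iff.mp hc)),
            if_pos (contains_ofList_iff.mpr h2)]
        decide
      · -- FINDING_CATEGORY_SECRETS absent
        by_cases h3 : "FINDING_CATEGORY_MALWARE" ∈ fcs
        · rw [fold_first (i := 3) (by norm_num) h3 (by intro j hj; interval_cases j <;> first | exact h0 | exact h1 | exact h2)]
          simp only [pvScanA, pvPrio]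
          rw [if_neg (fun hc => h0 (contains_ofList_iff.mp hc)),
              if_neg (fun hc => h1 (contains_ofList_iff.mp hc)),
              if_neg (fun hc => h2 (contains_ofList_iff.mp hc)),
              if_pos (contains_ofList_iff.mpr h3)]
          decide
        · -- FINDING_CATEGORY_MALWARE absent
          by_cases h4 : "FINDING_CATEGORY_LICENSE_RISK" ∈ fcs
          · rw [fold_first (i := 4) (by norm_num) h4 (by intro j hj; interval_cases j <;> first | exact h0 | exact h1 | exact h2 | exact h3)]
            simp only [pvScanA, pvPrio]
            rw [if_neg (fun hc => h0 (contains_ofList_iff.mp hc)),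
                if_neg (fun hc => h1 (contains_ofList_iff.mp hc)),
                if_neg (fun hc => h2 (contains_ofList_iff.mp hc)),
                if_neg (fun hc => h3 (contains_ofList_iff.mp hc)),
                if_pos (contains_ofList_iff.mpr h4)]
            decide
          · -- FINDING_CATEGORY_LICENSE_RISK absent
            by_cases h5 : "FINDING_CATEGORY_OPERATIONAL" ∈ fcs
            · rw [fold_first (i := 5) (by norm_num) h5 (by intro j hj; interval_cases j <;> first | exact h0 | exact h1 | exact h2 | exact h3 | exact h4)]
              simp only [pvScanA, pvPrio]
              rw [if_neg (fun hc => h0 (contains_ofList_iff.mp hc)),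
                  if_neg (fun hc => h1 (contains_ofList_iff.mp hc)),
                  if_neg (fun hc => h2 (contains_ofList_iff.mp hc)),
                  if_neg (fun hc => h3 (contains_ofList_iff.mp hc)),
                  if_neg (fun hc => h4 (contains_ofList_iff.mp hc)),
                  if_pos (contains_ofList_iff.mpr h5)]
              decide
            · -- FINDING_CATEGORY_OPERATIONAL absent
              by_cases h6 : "FINDING_CATEGORY_VULNERABILITY" ∈ fcs
              · rw [fold_first (i := 6) (by norm_num) h6 (by intro j hj; interval_cases j <;> first | exact h0 | exact h1 | exact h2 | exact h3 | exact h4 | exact h5)]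
                simp only [pvScanA, pvPrio]
                rw [if_neg (fun hc => h0 (contains_ofList_iff.mp hc)),
                    if_neg (fun hc => h1 (contains_ofList_iff.mp hc)),
                    if_neg (fun hc => h2 (contains_ofList_iff.mp hc)),
                    if_neg (fun hc => h3 (contains_ofList_iff.mp hc)),
                    if_neg (fun hc => h4 (contains_ofList_iff.mp hc)),
                    if_neg (fun hc => h5 (contains_ofList_iff.mp hc)),
                    if_pos (contains_ofList_iff.mpr h6)]
                decide
              · rw [fold_none (by intro j hj; interval_cases j <;> first | exact h0 | exact h1 | exact h2 | exact h3 | exact h4 | exact h5 | exact h6) none]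
                simp only [pvScanA, pvPrio]
                rw [if_neg (fun hc => h0 (contains_ofList_iff.mp hc)),
                    if_neg (fun hc => h1 (contains_ofList_iff.mp hc)),
                    if_neg (fun hc => h2 (contains_ofList_iff.mp hc)),
                    if_neg (fun hc => h3 (contains_ofList_iff.mp hc)),
                    if_neg (fun hc => h4 (contains_ofList_iff.mp hc)),
                    if_neg (fun hc => h5 (contains_ofList_iff.mp hc)),
                    if_neg (fun hc => h6 (contains_ofList_iff.mp hc))]

-- ===== VERDICT (by name: the statement is the Claim_ definition above) =====
theorem derive_category_spec : Claim_equal_derive_category := by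
  intro fcs _
  unfold Spec_derive_category derive_category derive_category_alt
  by_cases he : fcs.isEmpty
  · simp [he]
  · simp only [he]
    exact scanA_eq fcs
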